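-- pv_equiv track=rewrite | github.com/AliHamza02088/Enigmatix-Module-question | problem19 .py | alphabet_war
-- ===== SOURCE A (Python) =====
-- def alphabet_war(sequence: str) -> str:
--     left_side: dict = {"w": 4, "p": 3, "b": 2, "s": 1, "t": 0}
--     right_side: dict = {"m": 4, "q": 3, "d": 2, "z": 1, "j": 0,}
--
--     l_score: int = 0
--     r_score: int = 0
--
--     for char in sequence:
--         if char == "t": # Left Side Pretty word
--             return "Left Side Wins!"
--         elif char == "j": # Right Side Pretty word
--             return "Right Side Wins!"
--         elif char in left_side:
--             l_score += left_side[char]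
--         elif char in right_side:
--             r_score += right_side[char]
--
--     # Let's see who wins!!!!
--     if l_score > r_score:
--         return "Left Side Wins!"
--     elif l_score == r_score:
--         return "Draw"
--     else:
--         return "Right Side Wins!"
-- ===== SOURCE B (Python) =====
-- def alphabet_war(sequence: str) -> str:
--     pretty = next((c for c in sequence if c in "tj"), None)
--     if pretty == "t":
--         return "Left Side Wins!"
--     if pretty == "j":
--         return "Right Side Wins!"
--     left = {"w": 4, "p": 3, "b": 2, "s": 1}
--     right = {"m": 4, "q": 3, "d": 2, "z": 1}
--     l_score = sum(left.get(c, 0) for c in sequence)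
--     r_score = sum(right.get(c, 0) for c in sequence)
--     if l_score > r_score:
--         return "Left Side Wins!"
--     if l_score < r_score:
--         return "Right Side Wins!"
--     return "Draw"
-- ===== Notes on version B (the rewrite author's own statement) =====
-- stated objective: alternative
-- what changed: B splits A's single fused loop (early return on a pretty letter while accumulating both scores) into a first-pretty-letter search followed, only when none occurs, by two independent scoring sums over side dicts without the 0-weight pretty keys.
import Mathlib
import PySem

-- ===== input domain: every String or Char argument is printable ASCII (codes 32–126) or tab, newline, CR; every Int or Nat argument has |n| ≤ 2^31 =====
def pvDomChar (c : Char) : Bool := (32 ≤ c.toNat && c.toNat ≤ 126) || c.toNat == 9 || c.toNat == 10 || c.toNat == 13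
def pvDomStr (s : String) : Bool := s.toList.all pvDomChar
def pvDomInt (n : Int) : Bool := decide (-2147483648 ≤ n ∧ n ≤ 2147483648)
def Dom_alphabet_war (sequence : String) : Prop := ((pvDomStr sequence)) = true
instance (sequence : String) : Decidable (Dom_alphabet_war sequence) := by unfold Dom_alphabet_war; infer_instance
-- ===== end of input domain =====

-- B replaces A's fused early-return/scoring loop by a search for the first pretty letter
-- plus two separate scoring sums (objective: alternative decomposition, same cost).

-- ===== PORT A =====
def warLeftA : PySem.Dict Char Int :=
  PySem.Dict.ofList [('w', 4), ('p', 3), ('b', 2), ('s', 1), ('t', 0)]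
def warRightA : PySem.Dict Char Int :=
  PySem.Dict.ofList [('m', 4), ('q', 3), ('d', 2), ('z', 1), ('j', 0)]

-- the 'for char in sequence' loop with its two early returns, carrying l_score / r_score
def warGoA : List Char → Int → Int → String
  | [], l_score, r_score =>
    if l_score > r_score then "Left Side Wins!"
    else if l_score = r_score then "Draw"
    else "Right Side Wins!"
  | c :: cs, l_score, r_score =>
    if c = 't' then "Left Side Wins!"
    else if c = 'j' then "Right Side Wins!"
    else if warLeftA.contains c then warGoA cs (l_score + warLeftA.getD c 0) r_score
    else if warRightA.contains c then warGoA cs l_score (r_score + warRightA.getD c 0)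
    else warGoA cs l_score r_score

def alphabet_war (sequence : String) : String := warGoA sequence.toList 0 0

-- ===== PORT B =====
def warLeftB : PySem.Dict Char Int :=
  PySem.Dict.ofList [('w', 4), ('p', 3), ('b', 2), ('s', 1)]
def warRightB : PySem.Dict Char Int :=
  PySem.Dict.ofList [('m', 4), ('q', 3), ('d', 2), ('z', 1)]

def alphabet_war_alt (sequence : String) : String :=
  let pretty := sequence.toList.find? (fun c => PySem.Chars.isIn [c] "tj".toList)
  if pretty = some 't' then "Left Side Wins!"
  else if pretty = some 'j' then "Right Side Wins!"
  else
    let l_score := (sequence.toList.map (fun c => warLeftB.getD c 0)).sum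
    let r_score := (sequence.toList.map (fun c => warRightB.getD c 0)).sum
    if l_score > r_score then "Left Side Wins!"
    else if l_score < r_score then "Right Side Wins!"
    else "Draw"

-- ===== PRECONDITION & SPEC =====
def Spec_alphabet_war (sequence : String) (out : String) : Prop := out = alphabet_war_alt sequence
instance (sequence : String) (out : String) : Decidable (Spec_alphabet_war sequence out) := by unfold Spec_alphabet_war; infer_instance

-- ===== CLAIM (what is proved, stated in full; the proofs are below) =====
def Claim_equal_alphabet_war : Prop := ∀ (sequence : String), Dom_alphabet_war sequence → Spec_alphabet_war sequence (alphabet_war sequence)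

-- ===== LEMMAS AND PROOFS =====

lemma isIn_tj (c : Char) : PySem.Chars.isIn [c] "tj".toList = (c == 't' || c == 'j') := by
  rcases h : (c == 't' || c == 'j') with _ | _
  · simp at h
    rw [PySem.Chars.isIn_eq_false_iff]
    intro hinf
    have : c ∈ "tj".toList := hinf.subset (List.mem_singleton_self c)
    simp at this; tauto
  · simp at h
    rw [PySem.Chars.isIn_iff_infix]
    rcases h with h | h <;> subst h
    · exact ⟨[], ['j'], rfl⟩
    · exact ⟨['t'], [], rfl⟩

lemma leftA_contains (c : Char) :
    warLeftA.contains c = (c == 'w' || c == 'p' || c == 'b' || c == 's' || c == 't') := by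
  simp [warLeftA,
    show (PySem.Dict.ofList [('w', (4:Int)), ('p', 3), ('b', 2), ('s', 1), ('t', 0)]) =
      PySem.Dict.mk [('w', 4), ('p', 3), ('b', 2), ('s', 1), ('t', 0)] from rfl]
  simp [Bool.or_assoc, Bool.or_comm, Bool.or_left_comm, BEq.comm]

lemma rightA_contains (c : Char) :
    warRightA.contains c = (c == 'm' || c == 'q' || c == 'd' || c == 'z' || c == 'j') := by
  simp [warRightA,
    show (PySem.Dict.ofList [('m', (4:Int)), ('q', 3), ('d', 2), ('z', 1), ('j', 0)]) =
      PySem.Dict.mk [('m', 4), ('q', 3), ('d', 2), ('z', 1), ('j', 0)] from rfl]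
  simp [Bool.or_assoc, Bool.or_comm, Bool.or_left_comm, BEq.comm]

lemma leftA_getD (c : Char) :
    warLeftA.getD c 0 = (if c = 'w' then 4 else if c = 'p' then 3 else if c = 'b' then 2
      else if c = 's' then 1 else 0) := by
  simp [warLeftA,
    show (PySem.Dict.ofList [('w', (4:Int)), ('p', 3), ('b', 2), ('s', 1), ('t', 0)]) =
      PySem.Dict.mk [('w', 4), ('p', 3), ('b', 2), ('s', 1), ('t', 0)] from rfl,
    PySem.Dict.getD_eq_get?_getD, PySem.Dict.get?_mk_cons]
  split_ifs <;> simp_all [eq_comm, PySem.Dict.get?]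

lemma rightA_getD (c : Char) :
    warRightA.getD c 0 = (if c = 'm' then 4 else if c = 'q' then 3 else if c = 'd' then 2
      else if c = 'z' then 1 else 0) := by
  simp [warRightA,
    show (PySem.Dict.ofList [('m', (4:Int)), ('q', 3), ('d', 2), ('z', 1), ('j', 0)]) =
      PySem.Dict.mk [('m', 4), ('q', 3), ('d', 2), ('z', 1), ('j', 0)] from rfl,
    PySem.Dict.getD_eq_get?_getD, PySem.Dict.get?_mk_cons]
  split_ifs <;> simp_all [eq_comm, PySem.Dict.get?]

lemma leftB_getD (c : Char) :
    warLeftB.getD c 0 = (if c = 'w' then 4 else if c = 'p' then 3 else if c = 'b' then 2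
      else if c = 's' then 1 else 0) := by
  simp [warLeftB,
    show (PySem.Dict.ofList [('w', (4:Int)), ('p', 3), ('b', 2), ('s', 1)]) =
      PySem.Dict.mk [('w', 4), ('p', 3), ('b', 2), ('s', 1)] from rfl,
    PySem.Dict.getD_eq_get?_getD, PySem.Dict.get?_mk_cons]
  split_ifs <;> simp_all [eq_comm, PySem.Dict.get?]

lemma rightB_getD (c : Char) :
    warRightB.getD c 0 = (if c = 'm' then 4 else if c = 'q' then 3 else if c = 'd' then 2
      else if c = 'z' then 1 else 0) := by
  simp [warRightB,
    show (PySem.Dict.ofList [('m', (4:Int)), ('q', 3), ('d', 2), ('z', 1)]) =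
      PySem.Dict.mk [('m', 4), ('q', 3), ('d', 2), ('z', 1)] from rfl,
    PySem.Dict.getD_eq_get?_getD, PySem.Dict.get?_mk_cons]
  split_ifs <;> simp_all [eq_comm, PySem.Dict.get?]

-- B's tail phase, as a function of the accumulators and the remaining characters
def warTailB (cs : List Char) (l r : Int) : String :=
  let l_score := l + (cs.map (fun c => warLeftB.getD c 0)).sum
  let r_score := r + (cs.map (fun c => warRightB.getD c 0)).sum
  if l_score > r_score then "Left Side Wins!"
  else if l_score < r_score then "Right Side Wins!"
  else "Draw"

lemma warGoA_eq (cs : List Char) : ∀ l r : Int,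
    warGoA cs l r =
      match cs.find? (fun c => PySem.Chars.isIn [c] "tj".toList) with
      | some c => if c = 't' then "Left Side Wins!" else "Right Side Wins!"
      | none => warTailB cs l r := by
  induction cs with
  | nil =>
    intro l r
    simp [warGoA, warTailB]
    split_ifs <;> first | rfl | omega
  | cons c cs ih =>
    intro l r
    by_cases ht : c = 't'
    · subst ht
      rw [List.find?_cons_of_pos (by decide)]
      simp [warGoA]
    by_cases hj : c = 'j'
    · subst hj
      rw [List.find?_cons_of_pos (by decide)]
      simp [warGoA, ht]
    have hfind : (c :: cs).find? (fun c => PySem.Chars.isIn [c] "tj".toList)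
        = cs.find? (fun c => PySem.Chars.isIn [c] "tj".toList) := by
      rw [List.find?_cons_of_neg]
      rw [isIn_tj]
      simp [ht, hj]
    rw [hfind]
    have htail : ∀ l r : Int, warTailB (c :: cs) l r
        = warTailB cs (l + warLeftB.getD c 0) (r + warRightB.getD c 0) := by
      intro l r
      simp only [warTailB, List.map_cons, List.sum_cons]
      ring_nf
    simp only [warGoA, ht, hj, if_false, leftA_contains, rightA_contains]
    by_cases hL : (c == 'w' || c == 'p' || c == 'b' || c == 's' || c == 't') = true
    · rw [if_pos hL, ih]
      cases hf : cs.find? (fun c => PySem.Chars.isIn [c] "tj".toList) with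
      | some d => rfl
      | none =>
        rw [htail]
        have : warRightB.getD c 0 = 0 := by
          rw [rightB_getD]
          split_ifs <;> first | rfl | (subst_vars; simp at hL)
        have hlv : warLeftA.getD c 0 = warLeftB.getD c 0 := by
          rw [leftA_getD, leftB_getD]
        rw [this, hlv, add_zero]
    · rw [if_neg hL]
      by_cases hR : (c == 'm' || c == 'q' || c == 'd' || c == 'z' || c == 'j') = true
      · rw [if_pos hR, ih]
        cases hf : cs.find? (fun c => PySem.Chars.isIn [c] "tj".toList) with
        | some d => rfl
        | none =>
          rw [htail]
          have : warLeftB.getD c 0 = 0 := by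
            rw [leftB_getD]
            split_ifs <;> first | rfl | (subst_vars; simp at hR)
          have hrv : warRightA.getD c 0 = warRightB.getD c 0 := by
            rw [rightA_getD, rightB_getD]
          rw [this, hrv, add_zero]
      · rw [if_neg hR, ih]
        cases hf : cs.find? (fun c => PySem.Chars.isIn [c] "tj".toList) with
        | some d => rfl
        | none =>
          rw [htail]
          have hl0 : warLeftB.getD c 0 = 0 := by
            rw [leftB_getD]
            split_ifs <;> first | rfl | (subst_vars; simp at hL)
          have hr0 : warRightB.getD c 0 = 0 := by
            rw [rightB_getD]
            split_ifs <;> first | rfl | (subst_vars; simp at hR)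
          rw [hl0, hr0, add_zero, add_zero]

-- ===== VERDICT (by name: the statement is the Claim_ definition above) =====
theorem alphabet_war_spec : Claim_equal_alphabet_war := by
  intro s _
  unfold Spec_alphabet_war alphabet_war alphabet_war_alt
  rw [warGoA_eq]
  cases hf : s.toList.find? (fun c => PySem.Chars.isIn [c] "tj".toList) with
  | some c =>
    have hmem := List.find?_some hf
    rw [isIn_tj] at hmem
    simp only []
    by_cases ht : c = 't'
    · subst ht; simp
    · have hj : c = 'j' := by simp at hmem; tauto
      subst hj; simp
  | none => simp [warTailB]
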